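-- pv_equiv track=rewrite | github.com/yelimkong/programmers | 프로그래머스/2/42626. 더 맵게/더 맵게.py | solution
-- ===== SOURCE A (Python) =====
-- import heapq
--
-- def solution(scoville, K):
--     heapq.heapify(scoville)  # scoville 리스트를 힙으로 변환
--     answer = 0
--
--     # 가장 작은 스코빌 지수가 K 이상이 될 때까지 반복
--     while scoville[0] < K:
--         if len(scoville) > 1:
--             first = heapq.heappop(scoville)  # 가장 작은 지수
--             second = heapq.heappop(scoville)  # 두 번째로 작은 지수
--             new = first + 2 * second  #  지수 계산
--
--             heapq.heappush(scoville, new)  # 힙에 새 스코빌 지수 삽입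
--             answer += 1  # 섞은 횟수 증가
--         else:
--             return -1  # 두 개 이상의 스코빌 지수가 없을 때 K 이상을 만들 수 없으므로 -1 반환
--
--     return answer
-- ===== SOURCE B (Python) =====
-- def _insert_sorted(s, x):
--     i = 0
--     while i < len(s) and s[i] <= x:
--         i += 1
--     s.insert(i, x)
--
-- def solution(scoville, K):
--     s = sorted(scoville)
--     answer = 0
--     while s[0] < K:
--         if len(s) > 1:
--             first = s.pop(0)
--             second = s.pop(0)
--             _insert_sorted(s, first + 2 * second)
--             answer += 1
--         else:
--             return -1
--     return answer
-- ===== Notes on version B (the rewrite author's own statement) =====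
-- stated objective: alternative
-- what changed: B keeps the collection as a sorted list (one sort up front, then take the two head elements and re-insert the mix in order) instead of A's binary heap, so the two smallest are always at the front with no heap sifting.
import Mathlib
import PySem

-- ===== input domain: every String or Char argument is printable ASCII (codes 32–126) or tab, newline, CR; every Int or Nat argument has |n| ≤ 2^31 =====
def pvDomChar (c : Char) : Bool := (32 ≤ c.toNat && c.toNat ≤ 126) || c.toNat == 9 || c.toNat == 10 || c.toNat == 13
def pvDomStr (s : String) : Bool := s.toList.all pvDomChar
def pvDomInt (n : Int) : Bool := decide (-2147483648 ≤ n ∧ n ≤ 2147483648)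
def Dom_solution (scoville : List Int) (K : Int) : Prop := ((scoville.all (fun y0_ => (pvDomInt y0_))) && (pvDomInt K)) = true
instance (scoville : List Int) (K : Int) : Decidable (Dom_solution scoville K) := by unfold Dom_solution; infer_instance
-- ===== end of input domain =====

-- B replaces A's binary heap by one up-front sort plus ordered re-insertion of each mix
-- (two head elements are always the two smallest); return-value equivalence only:
-- A mutates its argument in place (heapify/heappop), B leaves it untouched.

-- ===== PORT A =====
-- A observes the heap only through heappop/heappush and heap[0] (the minimum); the heapq calls
-- are ported as the exact min-priority-queue operations on the list-as-multiset they implement: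
-- heappop = remove-and-return the minimum, heappush = add, heap[0] = the minimum.  This is exact
-- for A's return value on every input.

-- heappop: return the minimum and the heap without (one occurrence of) it.
-- The [] case is unreachable: A only pops when the heap has ≥ 2 elements.
def popMin (l : List Int) : Int × List Int :=
  match l with
  | [] => (0, [])
  | x :: xs =>
    let m := xs.foldl min x
    (m, (x :: xs).erase m)

-- the minimum of a nonempty list is one of its elements (used for termination below)
theorem min_foldl_mem (xs : List Int) (x : Int) : xs.foldl min x ∈ x :: xs := by
  induction xs generalizing x with
  | nil => simp
  | cons y ys ih =>
    have h := ih (min x y)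
    simp only [List.foldl_cons]
    rcases List.mem_cons.mp h with h1 | h1
    · rcases min_choice x y with h2 | h2 <;> rw [h1, h2] <;> simp
    · simp [h1]

theorem popMin_snd_length (l : List Int) (hne : l ≠ []) :
    (popMin l).2.length + 1 = l.length := by
  match l with
  | [] => exact absurd rfl hne
  | x :: xs =>
    simp only [popMin]
    have hm := min_foldl_mem xs x
    rw [List.length_erase_of_mem hm]
    simp

def solutionAux (h : List Int) (K : Int) (answer : Int) : Int :=
  match h with
  | [] => 0  -- unreachable under Pre_: scoville[0] on the empty list raises IndexError
  | x :: xs =>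
    if xs.foldl min x < K then          -- while scoville[0] < K
      if hlen : 0 < xs.length then      -- if len(scoville) > 1
        let p1 := popMin (x :: xs)      -- first  = heappop(scoville)
        let p2 := popMin p1.2           -- second = heappop(scoville)
        solutionAux (p2.2 ++ [p1.1 + 2 * p2.1]) K (answer + 1)  -- heappush(new); answer += 1
      else -1
    else answer
termination_by h.length
decreasing_by
  have h1 : (popMin (x :: xs)).2.length + 1 = (x :: xs).length :=
    popMin_snd_length _ (by simp)
  have h2 : (popMin (popMin (x :: xs)).2).2.length + 1 = (popMin (x :: xs)).2.length := by
    apply popMin_snd_length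
    intro hnil
    rw [hnil] at h1
    simp only [List.length_nil, List.length_cons] at h1
    omega
  simp only [List.length_append, List.length_cons, List.length_nil] at h1 h2 ⊢
  omega

def solution (scoville : List Int) (K : Int) : Int :=
  solutionAux scoville K 0   -- heapq.heapify: the list becomes the heap of the same multiset

-- ===== PORT B =====
-- _insert_sorted: insert x before the first element greater than x
def insertSorted (s : List Int) (x : Int) : List Int :=
  match s with
  | [] => [x]
  | y :: ys => if y ≤ x then y :: insertSorted ys x else x :: y :: ys

theorem length_insertSorted (s : List Int) (x : Int) :
    (insertSorted s x).length = s.length + 1 := by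
  induction s with
  | nil => simp [insertSorted]
  | cons y ys ih =>
    simp only [insertSorted]
    split <;> simp [ih]

def solutionAltAux (s : List Int) (K : Int) (answer : Int) : Int :=
  match s with
  | [] => 0  -- unreachable under Pre_: s[0] on the empty list raises IndexError
  | x :: xs =>
    if x < K then
      match xs with
      | [] => -1
      | y :: ys => solutionAltAux (insertSorted ys (x + 2 * y)) K (answer + 1)
    else answer
termination_by s.length
decreasing_by
  simp [length_insertSorted]

def solution_alt (scoville : List Int) (K : Int) : Int :=
  solutionAltAux (PySem.List.sorted scoville (fun z => z) false) K 0

-- ===== PRECONDITION & SPEC =====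
-- Pre_ excludes only the empty list, on which both Pythons raise IndexError at scoville[0]/s[0].
def Pre_solution (scoville : List Int) (K : Int) : Prop := scoville ≠ []
instance (scoville : List Int) (K : Int) : Decidable (Pre_solution scoville K) := by
  unfold Pre_solution; infer_instance

def pvWitness_solution : List Int × Int := ([1, 2, 3, 9, 10, 12], 7)

def Spec_solution (scoville : List Int) (K : Int) (out : Int) : Prop := out = solution_alt scoville K
instance (scoville : List Int) (K : Int) (out : Int) : Decidable (Spec_solution scoville K out) := by
  unfold Spec_solution; infer_instance

-- ===== CLAIM (what is proved, stated in full; the proofs are below) =====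
def Claim_equal_solution : Prop := ∀ (scoville : List Int) (K : Int), Dom_solution scoville K → Pre_solution scoville K → Spec_solution scoville K (solution scoville K)

-- ===== LEMMAS AND PROOFS =====

-- the foldl-min is a lower bound of all elements
theorem min_foldl_le (xs : List Int) (x : Int) : ∀ a ∈ x :: xs, xs.foldl min x ≤ a := by
  induction xs generalizing x with
  | nil => intro a ha; simp at ha; simp [ha]
  | cons y ys ih =>
    intro a ha
    simp only [List.foldl_cons]
    have hmem := ih (min x y) (min x y) (List.mem_cons_self ..)
    rcases List.mem_cons.mp ha with h1 | h1
    · subst h1; exact le_trans hmem (min_le_left _ _)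
    · rcases List.mem_cons.mp h1 with h2 | h2
      · subst h2; exact le_trans hmem (min_le_right _ _)
      · exact ih (min x y) a (List.mem_cons_of_mem _ h2)

-- the heap's minimum is the head of any sorted rearrangement
theorem min_foldl_eq_head (hx : Int) (ht : List Int) (x : Int) (xs : List Int)
    (hperm : (hx :: ht).Perm (x :: xs)) (hsort : (x :: xs).Pairwise (· ≤ ·)) :
    ht.foldl min hx = x := by
  have hmem : ht.foldl min hx ∈ x :: xs := hperm.mem_iff.mp (min_foldl_mem ht hx)
  have hxle : x ≤ ht.foldl min hx := by
    rcases List.mem_cons.mp hmem with h | h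
    · omega
    · exact List.rel_of_pairwise_cons hsort h
  have hlex : ht.foldl min hx ≤ x :=
    min_foldl_le ht hx x (hperm.symm.mem_iff.mp (List.mem_cons_self ..))
  omega

theorem mem_insertSorted (s : List Int) (x a : Int) :
    a ∈ insertSorted s x ↔ a = x ∨ a ∈ s := by
  induction s with
  | nil => simp [insertSorted]
  | cons y ys ih =>
    simp only [insertSorted]
    split <;> simp [ih] <;> tauto

theorem perm_insertSorted (s : List Int) (x : Int) :
    (insertSorted s x).Perm (x :: s) := by
  induction s with
  | nil => simp [insertSorted]
  | cons y ys ih =>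
    simp only [insertSorted]
    split
    · exact (ih.cons y).trans (List.Perm.swap x y ys)
    · exact List.Perm.refl _

theorem pairwise_insertSorted (s : List Int) (x : Int) (hs : s.Pairwise (· ≤ ·)) :
    (insertSorted s x).Pairwise (· ≤ ·) := by
  induction s with
  | nil => simp [insertSorted]
  | cons y ys ih =>
    rcases List.pairwise_cons.mp hs with ⟨hy, hys⟩
    simp only [insertSorted]
    split
    · rename_i hyx
      refine List.pairwise_cons.mpr ⟨?_, ih hys⟩
      intro a ha
      rcases (mem_insertSorted ys x a).mp ha with h | h
      · omega
      · exact hy a h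
    · rename_i hyx
      refine List.pairwise_cons.mpr ⟨?_, hs⟩
      intro a ha
      rcases List.mem_cons.mp ha with h | h
      · omega
      · have := hy a h; omega

-- core invariant: A's heap state and B's sorted state are rearrangements of each other
theorem aux_eq (n : Nat) : ∀ (h s : List Int) (K a : Int), h.length ≤ n →
    h.Perm s → s.Pairwise (· ≤ ·) → solutionAux h K a = solutionAltAux s K a := by
  induction n with
  | zero =>
    intro h s K a hlen hperm _
    have h0 : h = [] := List.length_eq_zero_iff.mp (by omega)
    have s0 : s = [] := (h0 ▸ hperm).symm.eq_nil
    rw [h0, s0, solutionAux.eq_def, solutionAltAux.eq_def]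
  | succ n ih =>
    intro h s K a hlen hperm hsort
    cases s with
    | nil =>
      rw [hperm.eq_nil, solutionAux.eq_def, solutionAltAux.eq_def]
    | cons x xs =>
      cases h with
      | nil => exact absurd hperm.symm.eq_nil (by simp)
      | cons hx ht =>
        have hmin : ht.foldl min hx = x := min_foldl_eq_head hx ht x xs hperm hsort
        rw [solutionAux.eq_def, solutionAltAux.eq_def]
        simp only [hmin]
        by_cases hK : x < K
        · simp only [if_pos hK]
          cases xs with
          | nil =>
            have hl0 : ht.length = 0 := by simpa using hperm.length_eq
            simp [hl0]
          | cons y ys =>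
            have hpos : 0 < ht.length := by
              have := hperm.length_eq; simp at this; omega
            simp only [dif_pos hpos]
            have hp1 : (popMin (hx :: ht)).1 = x := by simp [popMin, hmin]
            have hperm1 : (popMin (hx :: ht)).2.Perm (y :: ys) := by
              have h1 : ((hx :: ht).erase x).Perm ((x :: y :: ys).erase x) := hperm.erase x
              simpa [popMin, hmin] using h1
            rcases hh1 : (popMin (hx :: ht)).2 with _ | ⟨hy, hts⟩
            · rw [hh1] at hperm1
              exact absurd hperm1.symm.eq_nil (by simp)
            · rw [hh1] at hperm1
              have htl : (y :: ys).Pairwise (· ≤ ·) := hsort.of_cons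
              have hmin2 : hts.foldl min hy = y := min_foldl_eq_head hy hts y ys hperm1 htl
              have hp2 : (popMin (hy :: hts)).1 = y := by simp [popMin, hmin2]
              have hperm2 : (popMin (hy :: hts)).2.Perm ys := by
                have h2 : ((hy :: hts).erase y).Perm ((y :: ys).erase y) := hperm1.erase y
                simpa [popMin, hmin2] using h2
              rw [hp1, hp2]
              apply ih
              · have e1 := popMin_snd_length (hx :: ht) (by simp)
                rw [hh1] at e1
                have e2 := popMin_snd_length (hy :: hts) (by simp)
                simp only [List.length_append, List.length_cons, List.length_nil] at e1 e2 hlen ⊢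
                omega
              · refine ((hperm2.append_right [x + 2 * y]).trans ?_).trans
                  (perm_insertSorted ys (x + 2 * y)).symm
                exact List.perm_append_singleton _ _
              · exact pairwise_insertSorted ys (x + 2 * y) htl.of_cons
        · simp [if_neg hK]

-- ===== VERDICT (by name: the statement is the Claim_ definition above) =====
theorem solution_spec : Claim_equal_solution := by
  intro scoville K _ _
  unfold Spec_solution solution solution_alt
  exact aux_eq scoville.length scoville _ K 0 le_rfl
    (PySem.List.sorted_perm ..).symm (by simpa using PySem.List.sorted_pairwise (xs := scoville) (key := fun z => z))
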